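-- pv_equiv track=rewrite | github.com/manalsu1tan/idg_proj | packages/evals/scenarios.py | _flatten_keywords
-- ===== SOURCE A (Python) =====
-- def _flatten_keywords(slot_values: dict[str, list[str]], extras: list[str]) -> list[str]:
--     keywords: list[str] = []
--     for values in slot_values.values():
--         for value in values:
--             lowered = value.lower()
--             if lowered not in keywords:
--                 keywords.append(lowered)
--     for extra in extras:
--         lowered = extra.lower()
--         if lowered not in keywords:
--             keywords.append(lowered)
--     return keywords
-- ===== SOURCE B (Python) =====
-- def _flatten_keywords(slot_values: dict[str, list[str]], extras: list[str]) -> list[str]: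
--     flat = [v.lower() for vs in slot_values.values() for v in vs]
--     flat += [e.lower() for e in extras]
--     first: dict[str, int] = {}
--     for i, v in enumerate(flat):
--         if v not in first:
--             first[v] = i
--     return [v for i, v in enumerate(flat) if first[v] == i]
-- ===== Notes on version B (the rewrite author's own statement) =====
-- stated objective: faster
-- what changed: Instead of A's append-if-absent accumulation with a linear membership scan over the growing result, B flattens and lowercases once, builds a first-occurrence-index table in one pass, and then filters the enumerated flat list keeping each value only at its first index.
import Mathlib
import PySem

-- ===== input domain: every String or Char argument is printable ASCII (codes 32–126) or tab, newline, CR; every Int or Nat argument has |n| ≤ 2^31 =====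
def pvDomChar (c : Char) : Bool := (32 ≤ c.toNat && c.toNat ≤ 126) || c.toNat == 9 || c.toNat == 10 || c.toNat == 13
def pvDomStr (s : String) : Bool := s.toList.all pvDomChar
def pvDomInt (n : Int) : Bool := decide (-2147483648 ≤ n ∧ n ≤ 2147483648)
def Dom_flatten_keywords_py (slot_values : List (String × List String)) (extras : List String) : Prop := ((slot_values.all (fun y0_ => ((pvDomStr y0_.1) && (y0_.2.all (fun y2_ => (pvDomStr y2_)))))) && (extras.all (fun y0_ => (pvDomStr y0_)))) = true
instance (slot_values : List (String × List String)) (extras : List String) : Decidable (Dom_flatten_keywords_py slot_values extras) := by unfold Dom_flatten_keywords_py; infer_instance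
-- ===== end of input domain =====

-- B replaces A's nested append-if-absent accumulation by a different strategy: flatten once,
-- record each value's first index in a table, then FILTER the enumerated flat list, keeping a
-- value exactly at its first index (objective: faster — no linear membership scan per element).

-- ===== PORT A =====
def flatten_keywords_py (slot_values : List (String × List String)) (extras : List String) : List String :=
  let keywords : List String := []
  let keywords := slot_values.foldl (fun keywords p =>
    p.2.foldl (fun keywords value =>
      let lowered := PySem.Str.lower value
      if lowered ∉ keywords then keywords ++ [lowered] else keywords) keywords) keywords
  extras.foldl (fun keywords extra =>
    let lowered := PySem.Str.lower extra
    if lowered ∉ keywords then keywords ++ [lowered] else keywords) keywords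

-- ===== PORT B =====
def flatten_keywords_py_alt (slot_values : List (String × List String)) (extras : List String) : List String :=
  let flat := slot_values.flatMap (fun p => p.2.map PySem.Str.lower)
  let flat := flat ++ extras.map PySem.Str.lower
  let first := (PySem.List.enumerate flat).foldl
    (fun d iv => if d.contains iv.2 then d else d.insert iv.2 iv.1) PySem.Dict.empty
  -- Python's 'first[v] == i': every v of flat is a key of first, so get? is exact here
  ((PySem.List.enumerate flat).filter (fun iv => first.get? iv.2 == some iv.1)).map (·.2)

-- ===== PRECONDITION & SPEC =====
def Spec_flatten_keywords_py (slot_values : List (String × List String)) (extras : List String) (out : List String) : Prop := out = flatten_keywords_py_alt slot_values extras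
instance (slot_values : List (String × List String)) (extras : List String) (out : List String) : Decidable (Spec_flatten_keywords_py slot_values extras out) := by unfold Spec_flatten_keywords_py; infer_instance

-- ===== CLAIM (what is proved, stated in full; the proofs are below) =====
def Claim_equal_flatten_keywords_py : Prop := ∀ (slot_values : List (String × List String)) (extras : List String), Dom_flatten_keywords_py slot_values extras → Spec_flatten_keywords_py slot_values extras (flatten_keywords_py slot_values extras)

-- ===== LEMMAS AND PROOFS =====

-- A's append-if-absent step is exactly PySem.Set.add.
theorem pv_add_eq (kw : List String) (x : String) :
    (if x ∉ kw then kw ++ [x] else kw) = PySem.Set.add kw x := by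
  by_cases h : x ∈ kw <;> simp [PySem.Set.add, PySem.Set.contains, h]

theorem pv_foldl_add_map (l : List String) (kw : List String) :
    l.foldl (fun kw v => if PySem.Str.lower v ∉ kw then kw ++ [PySem.Str.lower v] else kw) kw
      = (l.map PySem.Str.lower).foldl PySem.Set.add kw := by
  rw [List.foldl_map]
  simp only [pv_add_eq]

theorem pv_foldl_flat (sv : List (String × List String)) (kw : List String) :
    sv.foldl (fun kw p => List.foldl PySem.Set.add kw (List.map PySem.Str.lower p.2)) kw
      = (sv.flatMap (fun p => p.2.map PySem.Str.lower)).foldl PySem.Set.add kw := by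
  induction sv generalizing kw with
  | nil => rfl
  | cons p t ih => simp only [List.foldl, List.flatMap_cons, List.foldl_append, ih]


theorem pv_first_get (l : List String) (s : Int) (d : PySem.Dict String Int) (v : String) :
    ((PySem.List.enumerate l s).foldl
        (fun d iv => if d.contains iv.2 then d else d.insert iv.2 iv.1) d).get? v
      = (d.get? v).or (((PySem.List.enumerate l s).find? (fun p => p.2 == v)).map (·.1)) := by
  induction l generalizing s d with
  | nil => simp [PySem.List.enumerate_nil]
  | cons a t ih =>
    rw [PySem.List.enumerate_cons]
    simp only [List.foldl_cons, List.find?_cons]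
    by_cases hv : v = a
    · subst hv
      simp only [BEq.rfl]  -- head predicate true? (a == v)... actually pred is (p.2 == v), head p = (s,a), so (a == v)
      by_cases hc : d.contains v
      · have hg : (d.get? v).isSome := by rw [← PySem.Dict.contains_eq_isSome_get?, hc]
        obtain ⟨j, hj⟩ := Option.isSome_iff_exists.mp hg
        simp [hc, ih, hj, Option.or]
      · have hg : d.get? v = none := by
          rw [← Option.not_isSome_iff_eq_none, ← PySem.Dict.contains_eq_isSome_get?]; exact hc
        simp [hc, ih, hg, PySem.Dict.get?_insert_self, Option.or]
    · have hb : (a == v) = false := by simp [Ne.symm hv]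
      simp only [hb]
      by_cases hc : d.contains a
      · simp [hc, ih]
      · simp [hc, ih, PySem.Dict.get?_insert_of_ne (hne := hv)]

theorem pv_find_first (pre t : List String) (a : String) (ha : a ∉ pre) :
    (PySem.List.enumerate (pre ++ a :: t) 0).find? (fun p => p.2 == a)
      = some (((pre.length : Int)), a) := by
  rw [PySem.List.enumerate_append, List.find?_append]
  have h1 : (PySem.List.enumerate pre 0).find? (fun p => p.2 == a) = none := by
    rw [List.find?_eq_none]
    intro q hq
    obtain ⟨k, hk, rfl⟩ := (PySem.List.mem_enumerate_iff _ _ _).mp hq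
    simp only [beq_iff_eq]
    exact fun h => ha (h ▸ List.getElem_mem hk)
  rw [h1, PySem.List.enumerate_cons]
  simp

theorem pv_find_dup (pre t : List String) (a : String) (ha : a ∈ pre) :
    ∃ k : Nat, k < pre.length ∧
      (PySem.List.enumerate (pre ++ a :: t) 0).find? (fun p => p.2 == a) = some ((k : Int), a) := by
  rw [PySem.List.enumerate_append, List.find?_append]
  have h1 : ((PySem.List.enumerate pre 0).find? (fun p => p.2 == a)).isSome := by
    rw [List.find?_isSome]
    obtain ⟨k, hk, rfl⟩ := List.mem_iff_getElem.mp ha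
    exact ⟨((k : Int), pre[k]), (PySem.List.mem_enumerate_iff _ _ _).mpr ⟨k, hk, by simp⟩, by simp⟩
  obtain ⟨q, hq⟩ := Option.isSome_iff_exists.mp h1
  have hmem := List.mem_of_find?_eq_some hq
  have hpred := List.find?_some hq
  obtain ⟨k, hk, rfl⟩ := (PySem.List.mem_enumerate_iff _ _ _).mp hmem
  simp only [beq_iff_eq] at hpred
  exact ⟨k, hk, by rw [hq]; simp [hpred]⟩

theorem pv_filter_dedup (full : List String) (l : List String) : ∀ (pre : List String), full = pre ++ l →
    PySem.Set.ofList pre ++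
      ((PySem.List.enumerate l (pre.length : Int)).filter
        (fun p => ((PySem.List.enumerate full 0).foldl
            (fun d iv => if d.contains iv.2 then d else d.insert iv.2 iv.1)
            PySem.Dict.empty).get? p.2 == some p.1)).map (·.2)
      = PySem.Set.ofList full := by
  induction l with
  | nil =>
    intro pre h
    simp [PySem.List.enumerate_nil, h]
  | cons a t ih =>
    intro pre h
    rw [PySem.List.enumerate_cons, List.filter_cons]
    have hget : ((PySem.List.enumerate full 0).foldl
            (fun d iv => if d.contains iv.2 then d else d.insert iv.2 iv.1)
            PySem.Dict.empty).get? a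
          = ((PySem.List.enumerate full 0).find? (fun p => p.2 == a)).map (·.1) := by
      rw [pv_first_get]
      simp [PySem.Dict.get?_empty, Option.or]
    have hlen : ((pre ++ [a]).length : Int) = (pre.length : Int) + 1 := by
      simp
    by_cases ha : a ∈ pre
    · obtain ⟨k, hk, hfind⟩ := pv_find_dup pre t a ha
      rw [h] at hget ⊢
      rw [hfind] at hget
      have hc : (((PySem.List.enumerate (pre ++ a :: t) 0).foldl
            (fun d iv => if d.contains iv.2 then d else d.insert iv.2 iv.1)
            PySem.Dict.empty).get? a == some ((pre.length : Int))) = false := by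
        rw [hget]
        simp only [Option.map_some, beq_eq_false_iff_ne, ne_eq, Option.some.injEq]
        intro hEq
        omega
      simp only [hc, if_neg, Bool.false_eq_true, not_false_iff]
      have := ih (pre ++ [a]) (by simp [h])
      rw [h] at this
      rw [hlen] at this
      rw [← this]
      have hofl : PySem.Set.ofList (pre ++ [a]) = PySem.Set.ofList pre := by
        rw [PySem.Set.ofList_eq_foldl, List.foldl_append]
        simp only [List.foldl_cons, List.foldl_nil]
        rw [← PySem.Set.ofList_eq_foldl]
        simp [PySem.Set.add, PySem.Set.contains, (PySem.Set.mem_ofList pre a).mpr ha]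
      rw [hofl]
    · rw [h] at hget ⊢
      rw [pv_find_first pre t a ha] at hget
      have hc : (((PySem.List.enumerate (pre ++ a :: t) 0).foldl
            (fun d iv => if d.contains iv.2 then d else d.insert iv.2 iv.1)
            PySem.Dict.empty).get? a == some ((pre.length : Int))) = true := by
        rw [hget]; simp
      simp only [hc, if_true, List.map_cons]
      have := ih (pre ++ [a]) (by simp [h])
      rw [h] at this
      rw [hlen] at this
      rw [← this]
      have hofl : PySem.Set.ofList (pre ++ [a]) = PySem.Set.ofList pre ++ [a] := by
        rw [PySem.Set.ofList_eq_foldl, List.foldl_append]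
        simp only [List.foldl_cons, List.foldl_nil]
        rw [← PySem.Set.ofList_eq_foldl]
        have hnc : a ∉ PySem.Set.ofList pre := fun hm => ha ((PySem.Set.mem_ofList pre a).mp hm)
        simp [PySem.Set.add, PySem.Set.contains, hnc]
      rw [hofl]
      simp


-- ===== VERDICT (by name: the statement is the Claim_ definition above) =====
theorem flatten_keywords_py_spec : Claim_equal_flatten_keywords_py := by
  intro sv extras _
  show flatten_keywords_py sv extras = flatten_keywords_py_alt sv extras
  have hB := pv_filter_dedup
      (sv.flatMap (fun p => p.2.map PySem.Str.lower) ++ extras.map PySem.Str.lower)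
      (sv.flatMap (fun p => p.2.map PySem.Str.lower) ++ extras.map PySem.Str.lower)
      [] rfl
  simp only [List.length_nil, Nat.cast_zero] at hB
  rw [flatten_keywords_py, flatten_keywords_py_alt]
  simp only [pv_foldl_add_map, pv_foldl_flat]
  rw [← List.foldl_append, ← PySem.Set.ofList_eq_foldl]
  simpa [show PySem.Set.ofList ([] : List String) = [] from rfl] using hB.symm
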